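-- pv_equiv track=rewrite | github.com/Nama21yo/Natnael_CP | D_Life_Across_the_Stars.py | solve
-- ===== SOURCE A (Python) =====
-- from collections import Counter, defaultdict, deque
--
-- def solve(logs,n):
--     line = defaultdict(int)
--     for birth, death in logs:
--         line[birth] += 1
--         line[death] -= 1
--     max_year = 0
--     running_sum = 0
--     count = 0
--
--     for year in sorted(line.keys()):
--         running_sum += line[year]
--         if running_sum > count:
--             max_year = year
--             count = running_sum
--     return [max_year,count]
-- ===== SOURCE B (Python) =====
-- def solve(logs, n):
--     best_year = 0
--     best_count = 0
--     for b, _d in logs: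
--         c = sum((bb <= b) - (db <= b) for bb, db in logs)
--         if c > best_count or (0 < c == best_count and b < best_year):
--             best_year, best_count = b, c
--     return [best_year, best_count]
-- ===== Notes on version B (the rewrite author's own statement) =====
-- stated objective: alternative
-- what changed: Replaces the delta-dictionary plus sorted sweep with running sum by a sort-free brute force: for each birth year it directly counts people born on-or-before minus died on-or-before that year, keeping the best count with smallest year on ties.
import Mathlib
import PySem

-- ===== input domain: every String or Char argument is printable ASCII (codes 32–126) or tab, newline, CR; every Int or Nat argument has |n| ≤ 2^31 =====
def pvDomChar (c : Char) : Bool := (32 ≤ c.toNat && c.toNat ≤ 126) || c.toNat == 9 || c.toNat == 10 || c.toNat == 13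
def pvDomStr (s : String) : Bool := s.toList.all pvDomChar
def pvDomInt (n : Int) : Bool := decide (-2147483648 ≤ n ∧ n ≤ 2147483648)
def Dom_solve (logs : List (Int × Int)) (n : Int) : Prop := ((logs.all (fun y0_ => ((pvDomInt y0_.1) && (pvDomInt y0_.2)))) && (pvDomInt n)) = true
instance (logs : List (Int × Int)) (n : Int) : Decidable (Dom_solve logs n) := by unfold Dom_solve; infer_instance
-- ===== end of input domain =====

-- B drops the delta-dictionary and the sort entirely: for each birth year it counts directly how
-- many people were born on-or-before minus died on-or-before it (brute force, quadratic), keeping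
-- the largest count and the smallest year on ties; the return value is proved equal to A's.

-- ===== PORT A =====
def solve (logs : List (Int × Int)) (_n : Int) : List Int :=
  let line := logs.foldl (fun d bd => (d.modify bd.1 0 (· + 1)).modify bd.2 0 (· - 1)) PySem.Dict.empty
  let st := (PySem.List.sorted line.keys (fun y => y) false).foldl
    (fun (st : Int × Int × Int) year =>
      let rs := st.2.1 + line.getD year 0
      if rs > st.2.2 then (year, rs, rs) else (st.1, rs, st.2.2)) (0, 0, 0)
  [st.1, st.2.2]

-- ===== PORT B =====
def solve_alt (logs : List (Int × Int)) (_n : Int) : List Int :=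
  let st := logs.foldl (fun (st : Int × Int) p =>
      let c := logs.foldl (fun a q =>
          a + (if q.1 ≤ p.1 then (1 : Int) else 0) - (if q.2 ≤ p.1 then 1 else 0)) 0
      if c > st.2 ∨ (0 < c ∧ c = st.2 ∧ p.1 < st.1) then (p.1, c) else st) (0, 0)
  [st.1, st.2]

-- ===== PRECONDITION & SPEC =====
def Spec_solve (logs : List (Int × Int)) (n : Int) (out : List Int) : Prop := out = solve_alt logs n
instance (logs : List (Int × Int)) (n : Int) (out : List Int) : Decidable (Spec_solve logs n out) := by unfold Spec_solve; infer_instance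

-- ===== CLAIM (what is proved, stated in full; the proofs are below) =====
def Claim_equal_solve : Prop := ∀ (logs : List (Int × Int)) (n : Int), Dom_solve logs n → Spec_solve logs n (solve logs n)

-- ===== LEMMAS AND PROOFS =====

-- number of people alive in year y: born on-or-before y minus died on-or-before y
def alive (logs : List (Int × Int)) (y : Int) : Int :=
  (((logs.map Prod.fst).countP (fun x => decide (x ≤ y)) : Int)
    - ((logs.map Prod.snd).countP (fun x => decide (x ≤ y)) : Int))

-- canonical sweep over a list of years with a delta function (shape of A's fold)
def sweep (f : Int → Int) : List Int → Int → Int → Int → List Int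
  | [], my, _, c => [my, c]
  | y :: t, my, rs, c =>
    if rs + f y > c then sweep f t y (rs + f y) (rs + f y) else sweep f t my (rs + f y) c

-- annotate each year with the running sum after it
def withSums (f : Int → Int) (rs : Int) : List Int → List (Int × Int)
  | [] => []
  | y :: t => (y, rs + f y) :: withSums f (rs + f y) t

-- sweep over precomputed (year, score) candidates
def sweepP : List (Int × Int) → Int → Int → Int × Int
  | [], my, c => (my, c)
  | q :: t, my, c => if q.2 > c then sweepP t q.1 q.2 else sweepP t my c

-- B's selection rule as a fold step over pairs, via a score function on the birth year
def bestStep (sc : Int → Int) (st : Int × Int) (p : Int × Int) : Int × Int :=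
  if sc p.1 > st.2 ∨ (0 < sc p.1 ∧ sc p.1 = st.2 ∧ p.1 < st.1) then (p.1, sc p.1) else st

-- the common characterization: best score (clamped at 0), smallest year attaining it
def IsBest (cands : List (Int × Int)) (p : Int × Int) : Prop :=
  0 ≤ p.2 ∧ (∀ q ∈ cands, q.2 ≤ p.2) ∧
    ((p.2 = 0 ∧ p.1 = 0) ∨ (p ∈ cands ∧ 0 < p.2 ∧ ∀ q ∈ cands, q.2 = p.2 → p.1 ≤ q.1))

def psum (f : Int → Int) (ys : List Int) (z : Int) : Int :=
  ((ys.filter (fun w => decide (w ≤ z))).map f).sum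

-- ---- A-side: the delta dictionary ----

theorem lineDict_getD (logs : List (Int × Int)) (d : PySem.Dict Int Int) (y : Int) :
    (logs.foldl (fun d bd => (d.modify bd.1 0 (· + 1)).modify bd.2 0 (· - 1)) d).getD y 0
      = d.getD y 0 + ((logs.map Prod.fst).count y : Int) - ((logs.map Prod.snd).count y : Int) := by
  induction logs generalizing d with
  | nil => simp
  | cons p rest ih =>
    obtain ⟨b, dd⟩ := p
    simp only [List.foldl_cons, List.map_cons, ih, PySem.Dict.getD_modify]
    by_cases h1 : y = dd
    · by_cases h2 : y = b
      · subst h1; subst h2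
        simp; omega
      · subst h1
        simp [h2, List.count_cons]; omega
    · by_cases h2 : y = b
      · subst h2
        simp [h1, List.count_cons]; omega
      · simp [h1, h2, Ne.symm h1, Ne.symm h2]

theorem keys_insert_add (d : PySem.Dict Int Int) (k v : Int) :
    (d.insert k v).keys = PySem.Set.add d.keys k := by
  by_cases h : k ∈ d.keys
  · rw [PySem.Dict.keys_insert_of_contains d v
      (by simp [PySem.Dict.contains_eq_decide_mem_keys, h])]
    simp [PySem.Set.add, PySem.Set.contains, h]
  · rw [PySem.Dict.keys_insert_of_not_contains d v
      (by simp [PySem.Dict.contains_eq_decide_mem_keys, h])]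
    simp [PySem.Set.add, PySem.Set.contains, h]

theorem keys_modify_add (d : PySem.Dict Int Int) (k : Int) (d0 : Int) (f : Int → Int) :
    (d.modify k d0 f).keys = PySem.Set.add d.keys k := by
  rw [PySem.Dict.keys_modify, keys_insert_add]

theorem lineDict_keys (logs : List (Int × Int)) (d : PySem.Dict Int Int) :
    (logs.foldl (fun d bd => (d.modify bd.1 0 (· + 1)).modify bd.2 0 (· - 1)) d).keys
      = PySem.Set.update d.keys (logs.flatMap (fun p => [p.1, p.2])) := by
  induction logs generalizing d with
  | nil => simp [PySem.Set.update]
  | cons p rest ih =>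
    simp only [List.foldl_cons, List.flatMap_cons, ih, keys_modify_add]
    simp [PySem.Set.update, List.foldl_cons]

-- ---- A-side: the fold over sorted keys is the canonical sweep, and the sweep is sweepP ----

theorem foldA_eq_sweep (g : Int → Int) (ys : List Int) : ∀ (my rs c : Int),
    (let st := ys.foldl (fun (st : Int × Int × Int) year =>
        if st.2.1 + g year > st.2.2 then (year, st.2.1 + g year, st.2.1 + g year)
        else (st.1, st.2.1 + g year, st.2.2)) (my, rs, c);
      [st.1, st.2.2]) = sweep g ys my rs c := by
  induction ys with
  | nil => intro my rs c; rfl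
  | cons y t ih =>
    intro my rs c
    simp only [List.foldl_cons, sweep]
    by_cases h : rs + g y > c
    · simpa [h] using ih y (rs + g y) (rs + g y)
    · simpa [h] using ih my (rs + g y) c

theorem sweep_eq_sweepP (f : Int → Int) (ys : List Int) : ∀ (my rs c : Int),
    sweep f ys my rs c
      = [(sweepP (withSums f rs ys) my c).1, (sweepP (withSums f rs ys) my c).2] := by
  induction ys with
  | nil => intro my rs c; rfl
  | cons y t ih =>
    intro my rs c
    by_cases h : rs + f y > c
    · simp [sweep, withSums, sweepP, h, ih]
    · simp [sweep, withSums, sweepP, h, ih]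

theorem withSums_eq_map (f : Int → Int) (ys : List Int) (hs : ys.Pairwise (· < ·)) :
    ∀ rs, withSums f rs ys = ys.map (fun z => (z, rs + psum f ys z)) := by
  induction ys with
  | nil => intro rs; rfl
  | cons y t ih =>
    obtain ⟨hlt, ht⟩ := List.pairwise_cons.mp hs
    intro rs
    have hhead : psum f (y :: t) y = f y := by
      have hft : t.filter (fun w => decide (w ≤ y)) = [] :=
        List.filter_eq_nil_iff.mpr (fun z hz => by
          simp only [decide_eq_true_eq]; exact not_le.mpr (hlt z hz))
      simp [psum, hft]
    have htail : ∀ z ∈ t, psum f (y :: t) z = f y + psum f t z := by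
      intro z hz
      have hyz : y ≤ z := le_of_lt (hlt z hz)
      simp [psum, hyz]
    calc withSums f rs (y :: t)
        = (y, rs + f y) :: withSums f (rs + f y) t := rfl
      _ = (y, rs + f y) :: t.map (fun z => (z, rs + f y + psum f t z)) := by rw [ih ht]
      _ = (y, rs + psum f (y :: t) y) :: t.map (fun z => (z, rs + psum f (y :: t) z)) := by
          rw [hhead]
          congr 1
          exact (List.map_congr_left (fun z hz => by rw [htail z hz]; ring_nf)).symm
      _ = (y :: t).map (fun z => (z, rs + psum f (y :: t) z)) := rfl

-- ---- counting sums over a nodup list of keys ----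

theorem sum_map_sub (l : List Int) (f g : Int → Int) :
    (l.map (fun x => f x - g x)).sum = (l.map f).sum - (l.map g).sum := by
  induction l with
  | nil => simp
  | cons x t ih => simp [ih]; ring

theorem sum_map_add (l : List Int) (f g : Int → Int) :
    (l.map (fun x => f x + g x)).sum = (l.map f).sum + (l.map g).sum := by
  induction l with
  | nil => simp
  | cons x t ih => simp [ih]; ring

theorem sum_ite_eq_mem (T : List Int) (hT : T.Nodup) (x : Int) :
    (T.map (fun w => if w = x then (1 : Int) else 0)).sum = if x ∈ T then 1 else 0 := by
  induction T with
  | nil => simp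
  | cons w t ih =>
    rcases List.nodup_cons.mp hT with ⟨hw, ht⟩
    by_cases h : w = x
    · subst h
      simp [ih ht, hw]
    · have hxw : ¬ x = w := fun hh => h hh.symm
      simp [if_neg h, ih ht, hxw]

theorem sum_count (T : List Int) (hT : T.Nodup) (L : List Int) :
    (T.map (fun w => (L.count w : Int))).sum = (L.countP (fun x => decide (x ∈ T)) : Int) := by
  induction L with
  | nil => simp
  | cons x L ih =>
    have hc : ∀ w : Int, ((x :: L).count w : Int) = (L.count w : Int) + (if w = x then 1 else 0) := by
      intro w
      rw [List.count_cons]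
      by_cases h : w = x
      · simp [h]
      · have h' : ¬x = w := fun hh => h hh.symm
        simp [h, h']
    calc (T.map (fun w => ((x :: L).count w : Int))).sum
        = (T.map (fun w => (L.count w : Int) + (if w = x then 1 else 0))).sum := by
          exact congrArg List.sum (List.map_congr_left (fun w _ => hc w))
      _ = (T.map (fun w => (L.count w : Int))).sum
            + (T.map (fun w => if w = x then (1 : Int) else 0)).sum := sum_map_add T _ _
      _ = ((x :: L).countP (fun x => decide (x ∈ T)) : Int) := by
          rw [ih, sum_ite_eq_mem T hT x, List.countP_cons]
          by_cases h : x ∈ T <;> simp [h]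

theorem psum_eq_alive (logs : List (Int × Int)) (S : List Int) (hnd : S.Nodup)
    (hb : ∀ x ∈ logs.map Prod.fst, x ∈ S) (hd : ∀ x ∈ logs.map Prod.snd, x ∈ S) (z : Int) :
    psum (fun y => ((logs.map Prod.fst).count y : Int) - ((logs.map Prod.snd).count y : Int)) S z
      = alive logs z := by
  have hTnd : (S.filter (fun w => decide (w ≤ z))).Nodup := hnd.filter _
  have hcount : ∀ (L : List Int), (∀ x ∈ L, x ∈ S) →
      ((S.filter (fun w => decide (w ≤ z))).map (fun w => (L.count w : Int))).sum
        = (L.countP (fun x => decide (x ≤ z)) : Int) := by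
    intro L hL
    rw [sum_count _ hTnd L]
    congr 1
    apply List.countP_congr
    intro x hx
    simp only [List.mem_filter, decide_eq_true_eq]
    constructor
    · rintro ⟨_, hxz⟩; exact hxz
    · intro hxz; exact ⟨hL x hx, hxz⟩
  unfold psum alive
  rw [sum_map_sub, hcount _ hb, hcount _ hd]

-- ---- IsBest: uniqueness and establishment by the two folds ----

theorem IsBest_unique (cands : List (Int × Int)) (p p' : Int × Int)
    (h : IsBest cands p) (h' : IsBest cands p') : p = p' := by
  obtain ⟨hp0, hpb, hpd⟩ := h
  obtain ⟨hq0, hqb, hqd⟩ := h'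
  rcases hpd with ⟨hc, hy⟩ | ⟨hm, hc, hmin⟩
  · rcases hqd with ⟨hc', hy'⟩ | ⟨hm', hc', hmin'⟩
    · cases p; cases p'; simp_all
    · exfalso; have := hpb _ hm'; omega
  · rcases hqd with ⟨hc', hy'⟩ | ⟨hm', hc', hmin'⟩
    · exfalso; have := hqb _ hm; omega
    · have h1 := hpb _ hm'
      have h2 := hqb _ hm
      have he : p.2 = p'.2 := by omega
      have h3 := hmin _ hm' (by omega)
      have h4 := hmin' _ hm he
      cases p; cases p'; simp_all; omega

theorem sweepP_best : ∀ (l acc : List (Int × Int)) (my c : Int),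
    ((acc ++ l).map Prod.fst).Pairwise (· < ·) → IsBest acc (my, c) →
    IsBest (acc ++ l) (sweepP l my c) := by
  intro l
  induction l with
  | nil => intro acc my c _ hbest; simpa using hbest
  | cons q t ih =>
    intro acc my c hpw hbest
    obtain ⟨h0, hbound, hdisj⟩ := hbest
    have happ : acc ++ q :: t = (acc ++ [q]) ++ t := by simp
    have hpw' : (((acc ++ [q]) ++ t).map Prod.fst).Pairwise (· < ·) := by rwa [← happ]
    have haccq : ∀ r ∈ acc, r.1 < q.1 := by
      intro r hr
      have := (List.pairwise_append.mp (by rwa [List.map_append] at hpw)).2.2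
      exact this r.1 (List.mem_map_of_mem hr) q.1 (by simp)
    rw [happ]
    show IsBest ((acc ++ [q]) ++ t) (sweepP (q :: t) my c)
    simp only [sweepP]
    by_cases h : q.2 > c
    · rw [if_pos h]
      apply ih _ _ _ hpw'
      refine ⟨by omega, ?_, Or.inr ⟨by simp, by omega, ?_⟩⟩
      · intro r hr
        rcases List.mem_append.mp hr with hr | hr
        · have := hbound r hr; simp at *; omega
        · simp at hr; subst hr; exact le_refl _
      · intro r hr hr2
        rcases List.mem_append.mp hr with hr | hr
        · exfalso; have := hbound r hr; omega
        · simp at hr; subst hr; exact le_refl _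
    · rw [if_neg h]
      apply ih _ _ _ hpw'
      refine ⟨h0, ?_, ?_⟩
      · intro r hr
        rcases List.mem_append.mp hr with hr | hr
        · exact hbound r hr
        · simp at hr; subst hr; omega
      · rcases hdisj with ⟨hc0, hy0⟩ | ⟨hm, hcpos, hmin⟩
        · exact Or.inl ⟨hc0, hy0⟩
        · refine Or.inr ⟨List.mem_append_left _ hm, hcpos, ?_⟩
          intro r hr hr2
          rcases List.mem_append.mp hr with hr | hr
          · exact hmin r hr hr2
          · simp at hr; subst hr
            exact le_of_lt (haccq _ hm)

theorem bestStep_preserves (sc : Int → Int) (acc : List (Int × Int)) (st : Int × Int)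
    (p : Int × Int) (h : IsBest acc st) :
    IsBest (acc ++ [(p.1, sc p.1)]) (bestStep sc st p) := by
  obtain ⟨h0, hbound, hdisj⟩ := h
  unfold bestStep
  by_cases hcond : sc p.1 > st.2 ∨ (0 < sc p.1 ∧ sc p.1 = st.2 ∧ p.1 < st.1)
  · rw [if_pos hcond]
    have hpos : 0 < sc p.1 := by rcases hcond with h1 | ⟨h1, _, _⟩ <;> omega
    have hge : st.2 ≤ sc p.1 := by rcases hcond with h1 | ⟨_, h2, _⟩ <;> omega
    refine ⟨by omega, ?_, Or.inr ⟨by simp, hpos, ?_⟩⟩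
    · intro r hr
      rcases List.mem_append.mp hr with hr | hr
      · have := hbound r hr; omega
      · simp at hr; subst hr; exact le_refl _
    · intro r hr hr2
      rcases List.mem_append.mp hr with hr | hr
      · rcases hcond with h1 | ⟨_, h2, h3⟩
        · exfalso; have := hbound r hr; omega
        · rcases hdisj with ⟨hc0, _⟩ | ⟨_, _, hmin⟩
          · omega
          · have := hmin r hr (by omega); omega
      · simp at hr; subst hr; exact le_refl _
  · rw [if_neg hcond]
    push Not at hcond
    obtain ⟨hle, hcond2⟩ := hcond
    refine ⟨h0, ?_, ?_⟩
    · intro r hr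
      rcases List.mem_append.mp hr with hr | hr
      · exact hbound r hr
      · simp at hr; subst hr; omega
    · rcases hdisj with ⟨hc0, hy0⟩ | ⟨hm, hcpos, hmin⟩
      · exact Or.inl ⟨hc0, hy0⟩
      · refine Or.inr ⟨List.mem_append_left _ hm, hcpos, ?_⟩
        intro r hr hr2
        rcases List.mem_append.mp hr with hr | hr
        · exact hmin r hr hr2
        · simp at hr; subst hr
          simp only [] at hr2
          have := hcond2 (by omega) (by omega)
          omega

theorem bestFold_best (sc : Int → Int) :
    ∀ (l acc : List (Int × Int)) (st : Int × Int), IsBest acc st →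
    IsBest (acc ++ l.map (fun p => (p.1, sc p.1))) (l.foldl (bestStep sc) st) := by
  intro l
  induction l with
  | nil => intro acc st h; simpa using h
  | cons p t ih =>
    intro acc st h
    have happ : acc ++ (p :: t).map (fun p => (p.1, sc p.1))
        = (acc ++ [(p.1, sc p.1)]) ++ t.map (fun p => (p.1, sc p.1)) := by simp
    rw [happ]
    exact ih _ _ (bestStep_preserves sc acc st p h)

-- ---- bridge: the best over all key years equals the best over birth years ----

theorem exists_max (L : List Int) (h : L ≠ []) : ∃ m ∈ L, ∀ x ∈ L, x ≤ m := by
  induction L with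
  | nil => exact absurd rfl h
  | cons a t ih =>
    by_cases ht : t = []
    · subst ht; exact ⟨a, by simp⟩
    · obtain ⟨m, hm, hle⟩ := ih ht
      by_cases ham : a ≤ m
      · refine ⟨m, List.mem_cons_of_mem _ hm, ?_⟩
        intro x hx
        rcases List.mem_cons.mp hx with rfl | hx
        · exact ham
        · exact hle x hx
      · refine ⟨a, List.mem_cons_self .., ?_⟩
        intro x hx
        rcases List.mem_cons.mp hx with rfl | hx
        · exact le_refl _
        · exact le_trans (hle x hx) (by omega)

theorem exists_birth (logs : List (Int × Int)) (y : Int) (hy : 0 < alive logs y) :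
    ∃ p ∈ logs, p.1 ≤ y ∧ alive logs y ≤ alive logs p.1 := by
  have hcB : 0 < (logs.map Prod.fst).countP (fun x => decide (x ≤ y)) := by
    unfold alive at hy; omega
  obtain ⟨b0, hb0, hb0y⟩ := List.countP_pos_iff.mp hcB
  have hne : (logs.map Prod.fst).filter (fun x => decide (x ≤ y)) ≠ [] := by
    intro hnil
    have : b0 ∈ (logs.map Prod.fst).filter (fun x => decide (x ≤ y)) :=
      List.mem_filter.mpr ⟨hb0, hb0y⟩
    rw [hnil] at this; exact absurd this (List.not_mem_nil)
  obtain ⟨m, hmF, hmax⟩ := exists_max _ hne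
  obtain ⟨hmB, hmy'⟩ := List.mem_filter.mp hmF
  have hmy : m ≤ y := by simpa using hmy'
  obtain ⟨p, hp, hpm⟩ := List.mem_map.mp hmB
  have hcBeq : (logs.map Prod.fst).countP (fun x => decide (x ≤ y))
      = (logs.map Prod.fst).countP (fun x => decide (x ≤ m)) := by
    apply List.countP_congr
    intro x hx
    simp only [decide_eq_true_eq]
    constructor
    · intro hxy
      exact hmax x (List.mem_filter.mpr ⟨hx, by simpa using hxy⟩)
    · intro hxm; omega
  have hcDle : (logs.map Prod.snd).countP (fun x => decide (x ≤ m))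
      ≤ (logs.map Prod.snd).countP (fun x => decide (x ≤ y)) := by
    apply List.countP_mono_left
    intro x _ hxm
    simp only [decide_eq_true_eq] at *
    omega
  refine ⟨p, hp, by omega, ?_⟩
  unfold alive
  rw [hpm, ← hcBeq]
  omega

theorem bridge (logs : List (Int × Int)) (keys : List Int)
    (hk : ∀ x, x ∈ keys ↔ x ∈ logs.map Prod.fst ∨ x ∈ logs.map Prod.snd)
    (pa pb : Int × Int)
    (ha : IsBest (keys.map (fun y => (y, alive logs y))) pa)
    (hb : IsBest (logs.map (fun p => (p.1, alive logs p.1))) pb) : pa = pb := by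
  have hsub : ∀ q ∈ logs.map (fun p => (p.1, alive logs p.1)),
      q ∈ keys.map (fun y => (y, alive logs y)) := by
    intro q hq
    obtain ⟨p, hp, rfl⟩ := List.mem_map.mp hq
    exact List.mem_map.mpr ⟨p.1, (hk p.1).mpr (Or.inl (List.mem_map_of_mem hp)), rfl⟩
  obtain ⟨ha0, habound, hadisj⟩ := ha
  have ha' : IsBest (logs.map (fun p => (p.1, alive logs p.1))) pa := by
    refine ⟨ha0, fun q hq => habound q (hsub q hq), ?_⟩
    rcases hadisj with ⟨hc, hy⟩ | ⟨hm, hc, hmin⟩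
    · exact Or.inl ⟨hc, hy⟩
    · obtain ⟨y, hyk, hya⟩ := List.mem_map.mp hm
      have hyc : alive logs y = pa.2 := congrArg Prod.snd hya
      have hy1 : y = pa.1 := congrArg Prod.fst hya
      obtain ⟨p, hp, hpy, hple⟩ := exists_birth logs y (by omega)
      have hpk : (p.1, alive logs p.1) ∈ keys.map (fun y => (y, alive logs y)) :=
        hsub _ (List.mem_map_of_mem hp)
      have hub := habound _ hpk
      have hpeq : alive logs p.1 = pa.2 := by simp at hub ⊢; omega
      have hge := hmin _ hpk (by simpa using hpeq)
      have hp1 : p.1 = y := by simp at hge; omega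
      refine Or.inr ⟨List.mem_map.mpr ⟨p, hp, by rw [hp1]; exact hya⟩, hc, ?_⟩
      intro q hq hq2
      exact hmin q (hsub q hq) hq2
  exact IsBest_unique _ pa pb ha' hb

-- ---- B-side: the inner sum computes `alive` ----

theorem innerFold (logs : List (Int × Int)) (y : Int) : ∀ a : Int,
    logs.foldl (fun a q => a + (if q.1 ≤ y then (1 : Int) else 0) - (if q.2 ≤ y then 1 else 0)) a
      = a + alive logs y := by
  induction logs with
  | nil => intro a; simp [alive]
  | cons p t ih =>
    intro a
    simp only [List.foldl_cons, ih]
    unfold alive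
    simp only [List.map_cons, List.countP_cons]
    by_cases h1 : p.1 ≤ y <;> by_cases h2 : p.2 ≤ y <;> simp [h1, h2] <;> omega

-- ---- assembling both sides ----

theorem solve_spec : Claim_equal_solve := by
  intro logs n _
  unfold Spec_solve
  -- A: fold over the dict's sorted keys = sweepP over (year, alive) candidates
  have hA1 : solve logs n =
      sweep (fun y => (logs.foldl
          (fun d bd => (d.modify bd.1 0 (· + 1)).modify bd.2 0 (· - 1)) (PySem.Dict.empty : PySem.Dict Int Int)).getD y 0)
        (PySem.List.sorted (logs.foldl
          (fun d bd => (d.modify bd.1 0 (· + 1)).modify bd.2 0 (· - 1)) (PySem.Dict.empty : PySem.Dict Int Int)).keys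
          (fun y => y) false) 0 0 0 := by
    unfold solve
    exact foldA_eq_sweep _ _ 0 0 0
  have hfun : (fun y => (logs.foldl
        (fun d bd => (d.modify bd.1 0 (· + 1)).modify bd.2 0 (· - 1)) (PySem.Dict.empty : PySem.Dict Int Int)).getD y 0)
      = fun y => ((logs.map Prod.fst).count y : Int) - ((logs.map Prod.snd).count y : Int) := by
    funext y; rw [lineDict_getD]; simp
  have hkeys : (logs.foldl
      (fun d bd => (d.modify bd.1 0 (· + 1)).modify bd.2 0 (· - 1)) (PySem.Dict.empty : PySem.Dict Int Int)).keys
      = PySem.Set.ofList (logs.flatMap (fun p => [p.1, p.2])) := by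
    rw [lineDict_keys, PySem.Dict.keys_empty, PySem.Set.update_nil_left]
  rw [hfun, hkeys] at hA1
  set ks := PySem.List.sorted (PySem.Set.ofList (logs.flatMap (fun p => [p.1, p.2]))) (fun y => y) false with hksdef
  have hpw : ks.Pairwise (· < ·) := PySem.List.sorted_ofList_pairwise_lt _
  have hnd : ks.Nodup := hpw.imp (fun h => ne_of_lt h)
  have hmemks : ∀ x, x ∈ ks ↔ x ∈ logs.map Prod.fst ∨ x ∈ logs.map Prod.snd := by
    intro x
    rw [hksdef, PySem.List.mem_sorted, PySem.Set.mem_ofList, List.mem_flatMap]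
    simp only [List.mem_map, List.mem_cons, List.not_mem_nil, or_false]
    constructor
    · rintro ⟨p, hp, rfl | rfl⟩
      · exact Or.inl ⟨p, hp, rfl⟩
      · exact Or.inr ⟨p, hp, rfl⟩
    · rintro (⟨p, hp, rfl⟩ | ⟨p, hp, rfl⟩)
      · exact ⟨p, hp, Or.inl rfl⟩
      · exact ⟨p, hp, Or.inr rfl⟩
  have hws : withSums (fun y => ((logs.map Prod.fst).count y : Int) - ((logs.map Prod.snd).count y : Int)) 0 ks
      = ks.map (fun z => (z, alive logs z)) := by
    rw [withSums_eq_map _ _ hpw 0]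
    apply List.map_congr_left
    intro z _
    rw [psum_eq_alive logs ks hnd (fun x hx => (hmemks x).mpr (Or.inl hx))
      (fun x hx => (hmemks x).mpr (Or.inr hx)) z]
    ring_nf
  rw [sweep_eq_sweepP, hws] at hA1
  have hinit : IsBest [] ((0 : Int), (0 : Int)) :=
    ⟨le_refl _, by simp, Or.inl ⟨rfl, rfl⟩⟩
  have hpwc : (((List.nil (α := Int × Int)) ++ ks.map (fun z => (z, alive logs z))).map Prod.fst).Pairwise (· < ·) := by
    simpa [List.map_map, Function.comp_def] using hpw
  have ha : IsBest (ks.map (fun z => (z, alive logs z)))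
      (sweepP (ks.map (fun z => (z, alive logs z))) 0 0) := by
    simpa using sweepP_best (ks.map (fun z => (z, alive logs z))) [] 0 0 hpwc hinit
  -- B: the literal fold is bestStep over `alive`
  have hstep : (fun (st : Int × Int) p =>
      let c := logs.foldl (fun a q =>
          a + (if q.1 ≤ p.1 then (1 : Int) else 0) - (if q.2 ≤ p.1 then 1 else 0)) 0
      if c > st.2 ∨ (0 < c ∧ c = st.2 ∧ p.1 < st.1) then (p.1, c) else st)
      = bestStep (alive logs) := by
    funext st p
    have := innerFold logs p.1 0
    simp only [this, zero_add, bestStep]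
  have hB1 : solve_alt logs n =
      [(logs.foldl (bestStep (alive logs)) (0, 0)).1, (logs.foldl (bestStep (alive logs)) (0, 0)).2] := by
    unfold solve_alt
    rw [hstep]
  have hb : IsBest (logs.map (fun p => (p.1, alive logs p.1)))
      (logs.foldl (bestStep (alive logs)) (0, 0)) := by
    simpa using bestFold_best (alive logs) logs [] (0, 0) hinit
  have hpab := bridge logs ks hmemks _ _ ha hb
  rw [hA1, hB1, hpab]
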